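-- pv_equiv track=rewrite | github.com/atharvthakle/LeetCode | 1808. Maximize Number of Nice Divisors/solution.py | maxNiceDivisors
-- ===== SOURCE A (Python) =====
-- def maxNiceDivisors(primeFactors: int) -> int:
--     MOD = 10**9 + 7
--
--     def power(x, y):
--         result = 1
--         x %= MOD
--         while y > 0:
--             if y & 1:
--                 result = (result * x) % MOD
--             x = (x * x) % MOD
--             y >>= 1
--         return result
--
--     if primeFactors <= 3:
--         return primeFactors
--
--     # Break primeFactors into 3's as much as possible
--     quotient, remainder = divmod(primeFactors, 3)
--
--     if remainder == 0:
--         return power(3, quotient) % MOD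
--     elif remainder == 1:
--         return (power(3, quotient - 1) * 4) % MOD
--     else:  # remainder == 2
--         return (power(3, quotient) * 2) % MOD
-- ===== SOURCE B (Python) =====
-- def maxNiceDivisors(primeFactors: int) -> int:
--     MOD = 10**9 + 7
--     if primeFactors <= 3:
--         return primeFactors
--
--     def modpow3(e):
--         # 3**e mod MOD by recursive halving
--         if e <= 0:
--             return 1
--         h = modpow3(e >> 1)
--         h = h * h % MOD
--         return h * 3 % MOD if e & 1 else h
--
--     q, r = primeFactors // 3, primeFactors % 3
--     if r == 0:
--         return modpow3(q)
--     if r == 1: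
--         return modpow3(q - 1) * 4 % MOD
--     return modpow3(q) * 2 % MOD
-- ===== Notes on version B (the rewrite author's own statement) =====
-- stated objective: alternative
-- what changed: Replaces A's iterative square-and-multiply loop (threading result/x/y state, reducing the base, and re-modding the final product) with a top-down recursive halving power specialised to base 3, computing quotient/remainder directly instead of via divmod.
import Mathlib
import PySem

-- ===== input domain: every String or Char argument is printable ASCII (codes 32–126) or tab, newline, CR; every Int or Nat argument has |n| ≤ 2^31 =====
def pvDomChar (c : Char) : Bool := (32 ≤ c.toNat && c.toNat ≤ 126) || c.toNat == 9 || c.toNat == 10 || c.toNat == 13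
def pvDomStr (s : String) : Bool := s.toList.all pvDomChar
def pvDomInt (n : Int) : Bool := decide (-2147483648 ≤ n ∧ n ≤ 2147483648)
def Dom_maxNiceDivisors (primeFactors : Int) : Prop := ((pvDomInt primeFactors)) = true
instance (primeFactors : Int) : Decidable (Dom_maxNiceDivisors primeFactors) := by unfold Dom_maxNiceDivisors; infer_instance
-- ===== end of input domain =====

-- B replaces A's iterative square-and-multiply loop by a top-down recursive halving power
-- specialised to base 3 (objective: alternative; same asymptotic cost).

-- ===== PORT A =====
-- the while-loop of A's inner `power`, state (x, result, y)
def pvPowerLoopA (x result y : Int) : Int :=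
  if 0 < y then
    pvPowerLoopA (PySem.Int.mod (x * x) 1000000007)
      (if PySem.Int.mod y 2 = 1 then PySem.Int.mod (result * x) 1000000007 else result)
      (PySem.Int.floordiv y 2)
  else result
termination_by y.toNat
decreasing_by
  have h2 : PySem.Int.floordiv y 2 = y / 2 := PySem.Int.floordiv_eq_ediv_of_pos (by omega)
  rw [h2]; omega

-- A's `power(x, y)`: result = 1; x %= MOD; then the loop
def pvPowerA (x y : Int) : Int := pvPowerLoopA (PySem.Int.mod x 1000000007) 1 y

def maxNiceDivisors (primeFactors : Int) : Int :=
  if primeFactors ≤ 3 then primeFactors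
  else
    let quotient := PySem.Int.floordiv primeFactors 3
    let remainder := PySem.Int.mod primeFactors 3
    if remainder = 0 then PySem.Int.mod (pvPowerA 3 quotient) 1000000007
    else if remainder = 1 then PySem.Int.mod (pvPowerA 3 (quotient - 1) * 4) 1000000007
    else PySem.Int.mod (pvPowerA 3 quotient * 2) 1000000007

-- ===== PORT B =====
-- B's `modpow3(e)`: 3**e mod MOD by recursive halving
def pvModPow3 (e : Int) : Int :=
  if 0 < e then
    let h := pvModPow3 (PySem.Int.floordiv e 2)
    let h2 := PySem.Int.mod (h * h) 1000000007
    if PySem.Int.mod e 2 = 1 then PySem.Int.mod (h2 * 3) 1000000007 else h2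
  else 1
termination_by e.toNat
decreasing_by
  have h2 : PySem.Int.floordiv e 2 = e / 2 := PySem.Int.floordiv_eq_ediv_of_pos (by omega)
  rw [h2]; omega

def maxNiceDivisors_alt (primeFactors : Int) : Int :=
  if primeFactors ≤ 3 then primeFactors
  else
    let q := PySem.Int.floordiv primeFactors 3
    let r := PySem.Int.mod primeFactors 3
    if r = 0 then pvModPow3 q
    else if r = 1 then PySem.Int.mod (pvModPow3 (q - 1) * 4) 1000000007
    else PySem.Int.mod (pvModPow3 q * 2) 1000000007

-- ===== PRECONDITION & SPEC =====
def Spec_maxNiceDivisors (primeFactors : Int) (out : Int) : Prop := out = maxNiceDivisors_alt primeFactors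
instance (primeFactors : Int) (out : Int) : Decidable (Spec_maxNiceDivisors primeFactors out) := by unfold Spec_maxNiceDivisors; infer_instance

-- ===== CLAIM (what is proved, stated in full; the proofs are below) =====
def Claim_equal_maxNiceDivisors : Prop := ∀ (primeFactors : Int), Dom_maxNiceDivisors primeFactors → Spec_maxNiceDivisors primeFactors (maxNiceDivisors primeFactors)

-- ===== LEMMAS AND PROOFS =====

-- A's loop computes (result * x^n) mod M for nonnegative exponents
theorem pvPowerLoopA_eq (n : Nat) : ∀ x r : Int, 0 ≤ x → 0 ≤ r → r < 1000000007 →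
    pvPowerLoopA x r (n : Int) = (r * x ^ n) % 1000000007 := by
  induction n using Nat.strong_induction_on with
  | _ n ih =>
    intro x r hx hr hrM
    rcases Nat.eq_zero_or_pos n with h0 | hpos
    · subst h0
      rw [pvPowerLoopA]
      simp [Int.emod_eq_of_lt hr hrM]
    · rw [pvPowerLoopA]
      have hy : (0 : Int) < (n : Int) := by exact_mod_cast hpos
      have hdiv : PySem.Int.floordiv (n : Int) 2 = ((n / 2 : Nat) : Int) := by
        exact_mod_cast PySem.Int.floordiv_natCast n 2
      have hmod : PySem.Int.mod (n : Int) 2 = ((n % 2 : Nat) : Int) := by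
        exact_mod_cast PySem.Int.mod_natCast n 2
      have hMpos : (0 : Int) < 1000000007 := by norm_num
      have hmm : ∀ a : Int, PySem.Int.mod a 1000000007 = a % 1000000007 := fun a =>
        PySem.Int.mod_eq_emod_of_pos hMpos
      have hxx : (0 : Int) ≤ (x * x) % 1000000007 := Int.emod_nonneg _ (by norm_num)
      have hlt : n / 2 < n := Nat.div_lt_self hpos (by norm_num)
      set k := n / 2 with hk
      have hn : n = k + k + n % 2 := by omega
      have hb : n % 2 = 0 ∨ n % 2 = 1 := by omega
      have hxxM : ((x * x) % 1000000007) ^ k % 1000000007 = (x * x) ^ k % 1000000007 := by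
        exact (Int.ModEq.pow k (Int.emod_emod_of_dvd (x * x) dvd_rfl))
      rcases hb with hb | hb
      · -- even
        rw [if_pos hy, hmod, hb]
        have : ¬ ((0 : Int) = 1) := by norm_num
        rw [if_neg (by exact_mod_cast this)]
        rw [hmm, hdiv, ih k hlt _ r hxx hr hrM]
        calc (r * ((x * x) % 1000000007) ^ k) % 1000000007
            = (r % 1000000007 * (((x * x) % 1000000007) ^ k % 1000000007)) % 1000000007 := by
              rw [Int.mul_emod]
          _ = (r % 1000000007 * ((x * x) ^ k % 1000000007)) % 1000000007 := by rw [hxxM]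
          _ = (r * (x * x) ^ k) % 1000000007 := by rw [← Int.mul_emod]
          _ = (r * x ^ n) % 1000000007 := by
              congr 1
              rw [hn, hb]
              try ring
      · -- odd
        rw [if_pos hy, hmod, hb]
        rw [if_pos (by norm_num)]
        have hr' : (0 : Int) ≤ (r * x) % 1000000007 := Int.emod_nonneg _ (by norm_num)
        have hr'M : (r * x) % 1000000007 < 1000000007 := Int.emod_lt_of_pos _ hMpos
        rw [hmm, hmm, hdiv, ih k hlt _ _ hxx hr' hr'M]
        calc ((r * x) % 1000000007 * ((x * x) % 1000000007) ^ k) % 1000000007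
            = ((r * x) % 1000000007 % 1000000007 * (((x * x) % 1000000007) ^ k % 1000000007)) % 1000000007 := by
              rw [Int.mul_emod]
          _ = ((r * x) % 1000000007 * ((x * x) ^ k % 1000000007)) % 1000000007 := by
              rw [hxxM, Int.emod_emod_of_dvd _ dvd_rfl]
          _ = ((r * x) * (x * x) ^ k) % 1000000007 := by
              rw [← Int.mul_emod]
          _ = (r * x ^ n) % 1000000007 := by
              congr 1
              rw [hn, hb]
              ring

-- B's recursive halving power computes 3^n mod M
theorem pvModPow3_eq (n : Nat) : pvModPow3 (n : Int) = (3 ^ n) % 1000000007 := by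
  induction n using Nat.strong_induction_on with
  | _ n ih =>
    rcases Nat.eq_zero_or_pos n with h0 | hpos
    · subst h0
      rw [pvModPow3]
      norm_num
    · rw [pvModPow3]
      have hy : (0 : Int) < (n : Int) := by exact_mod_cast hpos
      have hdiv : PySem.Int.floordiv (n : Int) 2 = ((n / 2 : Nat) : Int) := by
        exact_mod_cast PySem.Int.floordiv_natCast n 2
      have hmod : PySem.Int.mod (n : Int) 2 = ((n % 2 : Nat) : Int) := by
        exact_mod_cast PySem.Int.mod_natCast n 2
      have hMpos : (0 : Int) < 1000000007 := by norm_num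
      have hmm : ∀ a : Int, PySem.Int.mod a 1000000007 = a % 1000000007 := fun a =>
        PySem.Int.mod_eq_emod_of_pos hMpos
      have hlt : n / 2 < n := Nat.div_lt_self hpos (by norm_num)
      set k := n / 2 with hk
      have hn : n = k + k + n % 2 := by omega
      have hb : n % 2 = 0 ∨ n % 2 = 1 := by omega
      have hh := ih k hlt
      have hsq : ((3 : Int) ^ k % 1000000007 * (3 ^ k % 1000000007)) % 1000000007
          = (3 ^ (k + k)) % 1000000007 := by
        rw [← Int.mul_emod, pow_add]
      rcases hb with hb | hb
      · rw [if_pos hy, hmod, hb]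
        have : ¬ ((0 : Int) = 1) := by norm_num
        rw [if_neg (by exact_mod_cast this)]
        rw [hmm, hdiv, hh, hsq]
        congr 1
        rw [hn, hb]
        simp
      · rw [if_pos hy, hmod, hb]
        rw [if_pos (by norm_num)]
        rw [hmm, hmm, hdiv, hh, hsq]
        calc ((3 : Int) ^ (k + k) % 1000000007 * 3) % 1000000007
            = (3 ^ (k + k) * 3) % 1000000007 := by
              rw [Int.mul_emod, Int.emod_emod_of_dvd _ dvd_rfl, ← Int.mul_emod]
          _ = 3 ^ n % 1000000007 := by
              congr 1
              rw [hn, hb]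
              ring

-- `power(3, y)` as A calls it, for a nonnegative exponent
theorem pvPowerA_eq (n : Nat) : pvPowerA 3 (n : Int) = (3 ^ n) % 1000000007 := by
  unfold pvPowerA
  have h3 : PySem.Int.mod 3 1000000007 = 3 := by decide
  rw [h3, pvPowerLoopA_eq n 3 1 (by norm_num) (by norm_num) (by norm_num), one_mul]

-- ===== VERDICT (by name: the statement is the Claim_ definition above) =====
theorem maxNiceDivisors_spec : Claim_equal_maxNiceDivisors := by
  intro pf _
  unfold Spec_maxNiceDivisors maxNiceDivisors maxNiceDivisors_alt
  by_cases h : pf ≤ 3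
  · simp [h]
  · rw [if_neg h, if_neg h]
    have h4 : 4 ≤ pf := by omega
    have h3 : (0 : Int) < 3 := by norm_num
    have hq : PySem.Int.floordiv pf 3 = pf / 3 := PySem.Int.floordiv_eq_ediv_of_pos h3
    have hr : PySem.Int.mod pf 3 = pf % 3 := PySem.Int.mod_eq_emod_of_pos h3
    have hq1 : 1 ≤ pf / 3 := by omega
    have hn : pf / 3 = ((pf / 3).toNat : Int) := by omega
    set n : Nat := (pf / 3).toNat with hdefn
    have hn1 : 1 ≤ n := by omega
    have hq1' : pf / 3 - 1 = ((n - 1 : Nat) : Int) := by omega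
    have hMpos : (0 : Int) < 1000000007 := by norm_num
    have hmm : ∀ a : Int, PySem.Int.mod a 1000000007 = a % 1000000007 := fun a =>
      PySem.Int.mod_eq_emod_of_pos hMpos
    rw [hq, hr]
    by_cases h0 : pf % 3 = 0
    · rw [if_pos h0, if_pos h0, hn, pvPowerA_eq n, pvModPow3_eq n, hmm,
        Int.emod_emod_of_dvd _ dvd_rfl]
    · rw [if_neg h0, if_neg h0]
      by_cases h1 : pf % 3 = 1
      · rw [if_pos h1, if_pos h1, hq1', pvPowerA_eq (n - 1), pvModPow3_eq (n - 1)]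
      · rw [if_neg h1, if_neg h1, hn, pvPowerA_eq n, pvModPow3_eq n]
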